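-- pv_equiv track=rewrite | github.com/lordrubenbp/navi-assistant-server | dr_appinventor/appInstructor.py | connect_blocks
-- ===== SOURCE A (Python) =====
-- def connect_blocks(components):
--     score = 0
--     for item in components:
--         if item['type'] == "ActivityStarter":
--             if score < 1:
--                 score = 1
--         elif item['type'] == "BluetoothClient" \
--                 or item['type'] == "BluetoothServer":
--             if score < 2:
--                 score = 2
--         elif item['type'] == "Web":
--             if score < 3:
--                 score = 3
--     return score
-- ===== SOURCE B (Python) =====
-- def connect_blocks(components):
--     types = {item['type'] for item in components}
--     if "Web" in types:
--         return 3
--     if "BluetoothClient" in types or "BluetoothServer" in types: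
--         return 2
--     if "ActivityStarter" in types:
--         return 1
--     return 0
-- ===== Notes on version B (the rewrite author's own statement) =====
-- stated objective: alternative
-- what changed: Instead of a single pass with a running-max score per item, B builds the set of component types once and then checks the priorities highest-first (Web, then Bluetooth, then ActivityStarter) with early returns, so there is no per-item scoring or accumulator at all.
import Mathlib
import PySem

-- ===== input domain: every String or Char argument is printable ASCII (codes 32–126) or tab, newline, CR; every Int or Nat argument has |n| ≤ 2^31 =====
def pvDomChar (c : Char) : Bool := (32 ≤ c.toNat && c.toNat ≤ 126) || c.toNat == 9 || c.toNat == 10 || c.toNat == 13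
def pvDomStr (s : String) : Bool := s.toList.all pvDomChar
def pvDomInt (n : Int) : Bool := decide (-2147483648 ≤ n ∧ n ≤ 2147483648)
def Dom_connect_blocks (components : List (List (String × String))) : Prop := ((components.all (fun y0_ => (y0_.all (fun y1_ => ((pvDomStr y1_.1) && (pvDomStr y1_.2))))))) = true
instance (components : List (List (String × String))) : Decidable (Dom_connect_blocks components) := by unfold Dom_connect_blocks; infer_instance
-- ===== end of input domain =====

-- B replaces A's per-item running-max pass by collecting the set of component types once
-- and checking the priorities highest-first with early returns; objective: alternative, same O(n) cost.

-- ===== PORT A =====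
-- item['type'] raises KeyError when no "type" key is present; that case is excluded by
-- Pre_connect_blocks below (the 'none' arm here is never reached on admitted inputs).
def connect_blocks (components : List (List (String × String))) : Int :=
  components.foldl (fun score item =>
    match (PySem.Dict.mk item).get? "type" with
    | none => score
    | some t =>
      if t == "ActivityStarter" then (if score < 1 then 1 else score)
      else if t == "BluetoothClient" || t == "BluetoothServer" then
        (if score < 2 then 2 else score)
      else if t == "Web" then (if score < 3 then 3 else score)
      else score) 0

-- ===== PORT B =====
-- item['type'] raises KeyError in Python B too; the "" default is never reached under Pre_.
def pvTypeOf (item : List (String × String)) : String :=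
  (PySem.Dict.mk item).getD "type" ""

def connect_blocks_alt (components : List (List (String × String))) : Int :=
  let types : PySem.Set String := PySem.Set.ofList (components.map pvTypeOf)
  if PySem.Set.contains types "Web" then 3
  else if PySem.Set.contains types "BluetoothClient" || PySem.Set.contains types "BluetoothServer" then 2
  else if PySem.Set.contains types "ActivityStarter" then 1
  else 0

-- ===== PRECONDITION & SPEC =====
-- Pre_ excludes exactly the inputs where some component lacks a "type" key: there both
-- Python A and Python B raise KeyError.
def Pre_connect_blocks (components : List (List (String × String))) : Prop :=
  ∀ item ∈ components, (PySem.Dict.mk item).contains "type" = true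
instance (components : List (List (String × String))) : Decidable (Pre_connect_blocks components) := by unfold Pre_connect_blocks; infer_instance

def pvWitness_connect_blocks : (List (List (String × String))) :=
  [[("type", "Web")], [("type", "Label"), ("name", "l1")]]

def Spec_connect_blocks (components : List (List (String × String))) (out : Int) : Prop := out = connect_blocks_alt components
instance (components : List (List (String × String))) (out : Int) : Decidable (Spec_connect_blocks components out) := by unfold Spec_connect_blocks; infer_instance

-- ===== CLAIM (what is proved, stated in full; the proofs are below) =====
def Claim_equal_connect_blocks : Prop := ∀ (components : List (List (String × String))), Dom_connect_blocks components → Pre_connect_blocks components → Spec_connect_blocks components (connect_blocks components)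

-- ===== LEMMAS AND PROOFS =====

-- priority of a single type string, as A's branch chain assigns it
def pvPrio (t : String) : Int :=
  if t = "ActivityStarter" then 1
  else if t = "BluetoothClient" ∨ t = "BluetoothServer" then 2
  else if t = "Web" then 3
  else 0

-- B's priority chain, stated over the raw list of type strings
def pvChain (ts : List String) : Int :=
  if "Web" ∈ ts then 3
  else if "BluetoothClient" ∈ ts ∨ "BluetoothServer" ∈ ts then 2
  else if "ActivityStarter" ∈ ts then 1
  else 0

lemma pvChain_nonneg (ts : List String) : 0 ≤ pvChain ts := by
  unfold pvChain; split_ifs <;> norm_num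

lemma pvChain_cons (t : String) (ts : List String) :
    pvChain (t :: ts) = max (pvPrio t) (pvChain ts) := by
  unfold pvChain pvPrio
  simp only [List.mem_cons]
  split_ifs <;> simp_all <;> aesop

-- A's loop body equals max with the item's priority, for nonnegative running score
lemma stepA_eq_max (s : Int) (hs : 0 ≤ s) (item : List (String × String)) :
    (match (PySem.Dict.mk item).get? "type" with
      | none => s
      | some t =>
        if t == "ActivityStarter" then (if s < 1 then 1 else s)
        else if t == "BluetoothClient" || t == "BluetoothServer" then
          (if s < 2 then 2 else s)
        else if t == "Web" then (if s < 3 then 3 else s)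
        else s) = max s (pvPrio (pvTypeOf item)) := by
  unfold pvTypeOf PySem.Dict.getD
  cases h : (PySem.Dict.mk item).get? "type" with
  | none =>
    have : pvPrio "" = 0 := by decide
    simp [this, max_eq_left hs]
  | some t =>
    simp only [Option.getD_some, pvPrio]
    simp only [beq_iff_eq, Bool.or_eq_true]
    split_ifs <;> simp_all <;> omega

lemma foldA_eq_chain (l : List (List (String × String))) :
    ∀ (s : Int), 0 ≤ s →
      l.foldl (fun score item =>
        match (PySem.Dict.mk item).get? "type" with
        | none => score
        | some t =>
          if t == "ActivityStarter" then (if score < 1 then 1 else score)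
          else if t == "BluetoothClient" || t == "BluetoothServer" then
            (if score < 2 then 2 else score)
          else if t == "Web" then (if score < 3 then 3 else score)
          else score) s = max s (pvChain (l.map pvTypeOf)) := by
  induction l with
  | nil => intro s hs; simp [pvChain, max_eq_left hs]
  | cons x t ih =>
    intro s hs
    simp only [List.foldl_cons, List.map_cons]
    rw [stepA_eq_max s hs x, ih _ (le_max_of_le_left hs), pvChain_cons]
    exact max_assoc s (pvPrio (pvTypeOf x)) (pvChain (List.map pvTypeOf t))

lemma alt_eq_chain (components : List (List (String × String))) :
    connect_blocks_alt components = pvChain (components.map pvTypeOf) := by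
  unfold connect_blocks_alt pvChain
  simp only [PySem.Set.contains, List.contains_eq_mem, PySem.Set.mem_ofList, Bool.or_eq_true,
    decide_eq_true_eq]

-- ===== VERDICT (by name: the statement is the Claim_ definition above) =====
theorem connect_blocks_spec : Claim_equal_connect_blocks := by
  intro components _ _
  unfold Spec_connect_blocks connect_blocks
  rw [foldA_eq_chain components 0 le_rfl, alt_eq_chain,
    max_eq_right (pvChain_nonneg _)]
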